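-- pv_equiv track=rewrite | github.com/obedson/activcv | agent/app/middleware/security.py | _is_suspicious_user_agent
-- ===== SOURCE A (Python) =====
-- def _is_suspicious_user_agent(user_agent: str) -> bool:
--     """Check if user agent is suspicious"""
--     suspicious_agents = [
--         "sqlmap", "nikto", "nmap", "masscan", "zap", "burp",
--         "wget", "curl", "python-requests", "bot", "crawler",
--         "scanner", "exploit"
--     ]
--
--     user_agent_lower = user_agent.lower()
--     return any(agent in user_agent_lower for agent in suspicious_agents)
-- ===== SOURCE B (Python) =====
-- _SUSPICIOUS_TOKENS = (
--     "sqlmap", "nikto", "nmap", "masscan", "zap", "burp",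
--     "wget", "curl", "python-requests", "bot", "crawler",
--     "scanner", "exploit",
-- )
--
--
-- def _is_suspicious_user_agent(user_agent: str) -> bool:
--     """Single left-to-right scan: at each position test whether any token starts there."""
--     s = user_agent.lower()
--     for i in range(len(s)):
--         for t in _SUSPICIOUS_TOKENS:
--             if s.startswith(t, i):
--                 return True
--     return False
-- ===== Notes on version B (the rewrite author's own statement) =====
-- stated objective: alternative
-- what changed: B replaces A's any()-over-tokens loop of independent substring-containment tests with one explicit left-to-right scan of the lowered string that tests at each position whether any token starts there (the search itself is implemented, not delegated per-token to 'in').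
import Mathlib
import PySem

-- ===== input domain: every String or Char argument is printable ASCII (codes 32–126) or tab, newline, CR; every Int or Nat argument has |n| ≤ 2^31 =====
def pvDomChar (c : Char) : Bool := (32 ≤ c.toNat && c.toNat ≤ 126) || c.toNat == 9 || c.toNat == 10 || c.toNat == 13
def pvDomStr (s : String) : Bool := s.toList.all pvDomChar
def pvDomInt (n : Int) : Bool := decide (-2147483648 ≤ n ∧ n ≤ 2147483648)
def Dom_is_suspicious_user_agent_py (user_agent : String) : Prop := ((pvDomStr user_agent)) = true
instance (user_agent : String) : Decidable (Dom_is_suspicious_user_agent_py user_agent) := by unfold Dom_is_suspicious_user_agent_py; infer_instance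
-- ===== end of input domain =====

-- B replaces the per-token substring-containment loop with one explicit position-wise scan; same result, proved equivalent.

-- ===== PORT A =====
def pvSuspiciousAgents : List String :=
  ["sqlmap", "nikto", "nmap", "masscan", "zap", "burp",
   "wget", "curl", "python-requests", "bot", "crawler",
   "scanner", "exploit"]

def is_suspicious_user_agent_py (user_agent : String) : Bool :=
  let user_agent_lower := PySem.Str.lower user_agent
  pvSuspiciousAgents.any (fun agent => PySem.Str.isIn agent user_agent_lower)

-- ===== PORT B =====
def pvSuspiciousTokens : List (List Char) :=
  ["sqlmap".toList, "nikto".toList, "nmap".toList, "masscan".toList, "zap".toList,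
   "burp".toList, "wget".toList, "curl".toList, "python-requests".toList,
   "bot".toList, "crawler".toList, "scanner".toList, "exploit".toList]

def is_suspicious_user_agent_py_alt (user_agent : String) : Bool :=
  let s := PySem.Chars.lower user_agent.toList
  (List.range s.length).any (fun i =>
    pvSuspiciousTokens.any (fun t => t.isPrefixOf (s.drop i)))

-- ===== PRECONDITION & SPEC =====
def Spec_is_suspicious_user_agent_py (user_agent : String) (out : Bool) : Prop := out = is_suspicious_user_agent_py_alt user_agent
instance (user_agent : String) (out : Bool) : Decidable (Spec_is_suspicious_user_agent_py user_agent out) := by unfold Spec_is_suspicious_user_agent_py; infer_instance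

-- ===== CLAIM (what is proved, stated in full; the proofs are below) =====
def Claim_equal_is_suspicious_user_agent_py : Prop := ∀ (user_agent : String), Dom_is_suspicious_user_agent_py user_agent → Spec_is_suspicious_user_agent_py user_agent (is_suspicious_user_agent_py user_agent)

-- ===== LEMMAS AND PROOFS =====

-- For a nonempty needle, "infix" is "prefix of some drop at a position strictly inside the list".
theorem pv_isIn_iff_pos_prefix (t s : List Char) (ht : t ≠ []) :
    PySem.Chars.isIn t s = true ↔ ∃ i < s.length, t.isPrefixOf (s.drop i) := by
  rw [← PySem.Chars.exists_prefix_drop_iff_isIn]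
  constructor
  · rintro ⟨j, hj⟩
    by_cases h : j < s.length
    · exact ⟨j, h, List.isPrefixOf_iff_prefix.mpr hj⟩
    · exfalso
      rw [List.drop_eq_nil_of_le (by omega)] at hj
      exact ht (List.prefix_nil.mp hj)
  · rintro ⟨i, _, hp⟩
    exact ⟨i, List.isPrefixOf_iff_prefix.mp hp⟩

theorem pv_tokens_eq : pvSuspiciousAgents.map String.toList = pvSuspiciousTokens := by decide

-- ===== VERDICT (by name: the statement is the Claim_ definition above) =====
theorem is_suspicious_user_agent_py_spec : Claim_equal_is_suspicious_user_agent_py := by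
  intro ua _
  unfold Spec_is_suspicious_user_agent_py is_suspicious_user_agent_py is_suspicious_user_agent_py_alt
  rw [Bool.eq_iff_iff, List.any_eq_true, List.any_eq_true]
  constructor
  · rintro ⟨agent, hmem, hin⟩
    rw [PySem.Str.isIn_iff_infix, ← PySem.Chars.isIn_iff_infix] at hin
    have htoks : agent.toList ∈ pvSuspiciousTokens := by
      rw [← pv_tokens_eq]; exact List.mem_map_of_mem hmem
    have hne : agent.toList ≠ [] := by
      rw [← pv_tokens_eq] at htoks; fin_cases hmem <;> decide
    rw [PySem.Str.toList_lower] at hin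
    obtain ⟨i, hi, hp⟩ := (pv_isIn_iff_pos_prefix _ _ hne).mp hin
    exact ⟨i, List.mem_range.mpr hi, List.any_eq_true.mpr ⟨agent.toList, htoks, hp⟩⟩
  · rintro ⟨i, hir, hany⟩
    obtain ⟨t, htok, hp⟩ := List.any_eq_true.mp hany
    have hi := List.mem_range.mp hir
    have : ∃ agent ∈ pvSuspiciousAgents, agent.toList = t := by
      rw [← pv_tokens_eq] at htok
      obtain ⟨a, ha, he⟩ := List.mem_map.mp htok
      exact ⟨a, ha, he⟩
    obtain ⟨agent, hmem, rfl⟩ := this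
    refine ⟨agent, hmem, ?_⟩
    rw [PySem.Str.isIn_iff_infix, ← PySem.Chars.isIn_iff_infix, PySem.Str.toList_lower]
    have hne : agent.toList ≠ [] := by fin_cases hmem <;> decide
    exact (pv_isIn_iff_pos_prefix _ _ hne).mpr ⟨i, hi, hp⟩
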